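-- pv_equiv track=rewrite | github.com/SickTheDuck1411/IT001-Python | DeDaiHoc/TheTichLonNhat.py | findMaxVolume
-- ===== SOURCE A (Python) =====
-- def findMaxVolume(x,y):
--     MaxVolume=0
--     height = 0
--     rangeHeight = min(int(x/2)+1, int(y/2)+1)
--     for i in range(1,rangeHeight):
--         volume = (x - 2*i)*(y- 2*i)*i
--         if volume > MaxVolume:
--             MaxVolume = volume
--             height = i
--     return [height, x-2*height, y-2*height, MaxVolume]
-- ===== SOURCE B (Python) =====
-- def findMaxVolume(x, y):
--     # No positive cut height exists unless both sides are at least 2.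
--     if x < 2 or y < 2:
--         return [0, x, y, 0]
--     m = min(x // 2, y // 2)
--     # V(i) = (x-2i)(y-2i)i; its forward difference delta(i) = V(i+1)-V(i) is an
--     # upward parabola that is positive then non-positive on [1, m-1], so V is
--     # unimodal: binary-search the first h in [1, m] with h == m or delta(h) <= 0,
--     # which is the first maximizer of V (A's tie-break).
--     lo, hi = 1, m
--     while lo < hi:
--         mid = (lo + hi) // 2
--         d = (x - 2*(mid+1))*(y - 2*(mid+1))*(mid+1) - (x - 2*mid)*(y - 2*mid)*mid
--         if d <= 0:
--             hi = mid
--         else: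
--             lo = mid + 1
--     h = lo
--     v = (x - 2*h)*(y - 2*h)*h
--     if v > 0:
--         return [h, x - 2*h, y - 2*h, v]
--     return [0, x, y, 0]
-- ===== Notes on version B (the rewrite author's own statement) =====
-- stated objective: faster
-- what changed: Replaces A's linear scan over all cut heights by a binary search for the peak of the unimodal volume cubic (first height where the forward difference becomes non-positive), keeping A's first-maximizer tie-break and zero fallback.
import Mathlib
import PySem

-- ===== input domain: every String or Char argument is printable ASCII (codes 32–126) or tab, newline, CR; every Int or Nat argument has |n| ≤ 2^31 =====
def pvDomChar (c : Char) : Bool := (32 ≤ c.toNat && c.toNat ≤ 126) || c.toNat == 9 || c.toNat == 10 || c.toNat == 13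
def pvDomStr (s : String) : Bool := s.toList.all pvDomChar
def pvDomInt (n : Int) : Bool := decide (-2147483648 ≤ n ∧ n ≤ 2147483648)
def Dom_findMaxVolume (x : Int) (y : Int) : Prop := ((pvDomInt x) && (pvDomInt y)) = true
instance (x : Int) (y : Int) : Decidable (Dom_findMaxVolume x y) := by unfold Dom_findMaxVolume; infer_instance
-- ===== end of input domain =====

-- B replaces A's linear scan over cut heights by a binary search for the peak of the
-- unimodal volume cubic; objective: faster (asymptotic).

-- ===== PORT A =====
-- int(x/2): x/2 is an exact float for |x| ≤ 2^31, and int() truncates toward zero = Int.tdiv.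
def findMaxVolume (x : Int) (y : Int) : List Int :=
  let rangeHeight := min (Int.tdiv x 2 + 1) (Int.tdiv y 2 + 1)
  let st := (PySem.List.pyRange 1 rangeHeight 1).foldl
    (fun (s : Int × Int) i =>
      let volume := (x - 2*i)*(y - 2*i)*i
      if volume > s.1 then (volume, i) else s) (0, 0)
  [st.2, x - 2*st.2, y - 2*st.2, st.1]

-- ===== PORT B =====
def pvVol (x y i : Int) : Int := (x - 2*i)*(y - 2*i)*i

def pvDelta (x y i : Int) : Int := pvVol x y (i+1) - pvVol x y i

-- the while-loop of Source B, as the obvious structural recursion on hi - lo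
def pvSearch (x y lo hi : Int) : Int :=
  if hlt : lo < hi then
    let mid := PySem.Int.floordiv (lo + hi) 2
    if pvDelta x y mid ≤ 0 then pvSearch x y lo mid
    else pvSearch x y (mid + 1) hi
  else lo
termination_by (hi - lo).toNat
decreasing_by
  · have h1 : lo * 2 ≤ lo + hi := by omega
    have := (PySem.Int.le_floordiv_iff_mul_le (a := lo + hi) (b := 2) (q := lo) (by norm_num)).mpr h1
    have h2 : (PySem.Int.floordiv (lo + hi) 2) < hi :=
      (PySem.Int.floordiv_lt_iff_lt_mul (a := lo + hi) (b := 2) (q := hi) (by norm_num)).mpr (by omega)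
    simp only [mid] at *
    omega
  · have h1 : lo * 2 ≤ lo + hi := by omega
    have := (PySem.Int.le_floordiv_iff_mul_le (a := lo + hi) (b := 2) (q := lo) (by norm_num)).mpr h1
    simp only [mid] at *
    omega

def findMaxVolume_alt (x : Int) (y : Int) : List Int :=
  if x < 2 ∨ y < 2 then [0, x, y, 0]
  else
    let m := min (PySem.Int.floordiv x 2) (PySem.Int.floordiv y 2)
    let h := pvSearch x y 1 m
    let v := pvVol x y h
    if v > 0 then [h, x - 2*h, y - 2*h, v] else [0, x, y, 0]

-- ===== PRECONDITION & SPEC =====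
def Spec_findMaxVolume (x : Int) (y : Int) (out : List Int) : Prop := out = findMaxVolume_alt x y
instance (x : Int) (y : Int) (out : List Int) : Decidable (Spec_findMaxVolume x y out) := by unfold Spec_findMaxVolume; infer_instance

-- ===== CLAIM (what is proved, stated in full; the proofs are below) =====
def Claim_equal_findMaxVolume : Prop := ∀ (x : Int) (y : Int), Dom_findMaxVolume x y → Spec_findMaxVolume x y (findMaxVolume x y)

-- ===== LEMMAS AND PROOFS =====

-- discrete convexity identity for the quadratic pvDelta (leading coefficient 12)
theorem pvDelta_convex (x y a b c : Int) :
    (c - a) * pvDelta x y b =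
      (c - b) * pvDelta x y a + (b - a) * pvDelta x y c - 12 * (c - b) * (b - a) * (c - a) := by
  unfold pvDelta pvVol; ring

-- at the last admissible step the volume does not increase
theorem pvDelta_last (x y m : Int) (hx : 2 ≤ x) (hy : 2 ≤ y)
    (hm : m = min (PySem.Int.floordiv x 2) (PySem.Int.floordiv y 2)) (h2 : 2 ≤ m) :
    pvDelta x y (m - 1) ≤ 0 := by
  have hxq := (PySem.Int.floordiv_eq_iff_of_pos (a := x) (b := 2)
    (q := PySem.Int.floordiv x 2) (by norm_num)).mp rfl
  have hyq := (PySem.Int.floordiv_eq_iff_of_pos (a := y) (b := 2)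
    (q := PySem.Int.floordiv y 2) (by norm_num)).mp rfl
  have hma : 2 * m ≤ x := by omega
  have hmb : 2 * m ≤ y := by omega
  have hone : x - 2 * m ≤ 1 ∨ y - 2 * m ≤ 1 := by omega
  unfold pvDelta pvVol
  rcases hone with h | h
  · nlinarith [mul_nonneg (by omega : (0:Int) ≤ y - 2*m) (by omega : (0:Int) ≤ m - 1)]
  · nlinarith [mul_nonneg (by omega : (0:Int) ≤ x - 2*m) (by omega : (0:Int) ≤ m - 1)]

-- once the forward difference is non-positive it stays non-positive up to m-1
theorem pvDelta_mono (x y m i j : Int) (hx : 2 ≤ x) (hy : 2 ≤ y)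
    (hm : m = min (PySem.Int.floordiv x 2) (PySem.Int.floordiv y 2))
    (h1 : 1 ≤ i) (hij : i ≤ j) (hjm : j ≤ m - 1) (hi0 : pvDelta x y i ≤ 0) :
    pvDelta x y j ≤ 0 := by
  rcases eq_or_lt_of_le hij with rfl | hlt
  · exact hi0
  · have hlast : pvDelta x y (m - 1) ≤ 0 := pvDelta_last x y m hx hy hm (by omega)
    rcases eq_or_lt_of_le hjm with rfl | hjlt
    · exact hlast
    · have hid := pvDelta_convex x y i j (m - 1)
      have t1 : (m - 1 - j) * pvDelta x y i ≤ 0 :=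
        mul_nonpos_of_nonneg_of_nonpos (by omega) hi0
      have t2 : (j - i) * pvDelta x y (m - 1) ≤ 0 :=
        mul_nonpos_of_nonneg_of_nonpos (by omega) hlast
      have t3 : (0:Int) ≤ 12 * (m - 1 - j) * (j - i) * (m - 1 - i) := by
        have := mul_nonneg (mul_nonneg (by omega : (0:Int) ≤ 12 * (m - 1 - j)) (by omega : (0:Int) ≤ j - i)) (by omega : (0:Int) ≤ m - 1 - i)
        linarith
      nlinarith [hid, t1, t2, t3]

-- binary-search invariant: pvSearch returns h with 1 ≤ h ≤ m, the difference positive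
-- strictly below h and non-positive from h to m-1
theorem pvSearch_spec (x y m : Int) (hx : 2 ≤ x) (hy : 2 ≤ y)
    (hm : m = min (PySem.Int.floordiv x 2) (PySem.Int.floordiv y 2)) :
    ∀ (n : Nat) (lo hi : Int), (hi - lo).toNat = n → 1 ≤ lo → lo ≤ hi → hi ≤ m →
    (∀ i, 1 ≤ i → i < lo → 0 < pvDelta x y i) →
    (∀ i, hi ≤ i → i ≤ m - 1 → pvDelta x y i ≤ 0) →
    lo ≤ pvSearch x y lo hi ∧ pvSearch x y lo hi ≤ hi ∧
    (∀ i, 1 ≤ i → i < pvSearch x y lo hi → 0 < pvDelta x y i) ∧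
    (∀ i, pvSearch x y lo hi ≤ i → i ≤ m - 1 → pvDelta x y i ≤ 0) := by
  intro n
  induction n using Nat.strong_induction_on with
  | _ n IH =>
    intro lo hi hn hlo1 hlohi hhim hL hR
    rw [pvSearch]
    by_cases hlt : lo < hi
    · simp only [hlt, dif_pos]
      have hmid1 : lo ≤ PySem.Int.floordiv (lo + hi) 2 :=
        (PySem.Int.le_floordiv_iff_mul_le (by norm_num)).mpr (by omega)
      have hmid2 : PySem.Int.floordiv (lo + hi) 2 < hi :=
        (PySem.Int.floordiv_lt_iff_lt_mul (by norm_num)).mpr (by omega)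
      set mid := PySem.Int.floordiv (lo + hi) 2 with hmiddef
      by_cases hd : pvDelta x y mid ≤ 0
      · simp only [hd, if_pos]
        have hrec := IH (mid - lo).toNat (by omega) lo mid rfl hlo1 (by omega) (by omega) hL
          (fun i hi1 hi2 => pvDelta_mono x y m mid i hx hy hm (by omega) hi1 hi2 hd)
        exact ⟨hrec.1, by omega, hrec.2.2⟩
      · simp only [hd, if_neg, not_false_iff]
        have hL' : ∀ i, 1 ≤ i → i < mid + 1 → 0 < pvDelta x y i := by
          intro i hi1 hi2
          by_cases hilo : i < lo
          · exact hL i hi1 hilo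
          · by_contra hcon
            exact hd (pvDelta_mono x y m i mid hx hy hm hi1 (by omega) (by omega)
              (by omega))
        have hrec := IH (hi - (mid + 1)).toNat (by omega) (mid + 1) hi rfl (by omega)
          (by omega) hhim hL' hR
        exact ⟨by omega, hrec.2.1, hrec.2.2⟩
    · simp only [hlt, dif_neg, not_false_iff]
      have : lo = hi := by omega
      exact ⟨le_refl _, by omega, hL, by rw [this]; exact hR⟩

-- the volume never exceeds pvVol h on [h, m]
theorem pvVol_le_peak (x y m h : Int)
    (H2 : ∀ i, h ≤ i → i ≤ m - 1 → pvDelta x y i ≤ 0) :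
    ∀ (k : Nat), h + k ≤ m → pvVol x y (h + k) ≤ pvVol x y h := by
  intro k
  induction k with
  | zero => simp
  | succ k ih =>
    intro hk
    have hd := H2 (h + k) (by omega) (by push_cast at hk ⊢; omega)
    have := ih (by push_cast at hk ⊢; omega)
    unfold pvDelta at hd
    have : pvVol x y (h + k + 1) ≤ pvVol x y h := by omega
    have heq : h + ((k : Int) + 1) = h + k + 1 := by ring
    rw [show ((k + 1 : Nat) : Int) = (k : Int) + 1 by push_cast; ring, heq]
    exact this

-- characterization of A's fold over heights 1..n
theorem fold_inv (x y m h : Int) (hh1 : 1 ≤ h) (hhm : h ≤ m)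
    (H1 : ∀ i, 1 ≤ i → i < h → 0 < pvDelta x y i)
    (H2 : ∀ i, h ≤ i → i ≤ m - 1 → pvDelta x y i ≤ 0) :
    ∀ (n : Int), 0 ≤ n → n ≤ m →
    ((PySem.List.pyRange 1 (n + 1) 1).foldl
      (fun (s : Int × Int) i =>
        let volume := (x - 2*i)*(y - 2*i)*i
        if volume > s.1 then (volume, i) else s) (0, 0)) =
      (if n ≤ h then (if 0 < pvVol x y n then (pvVol x y n, n) else (0, 0))
       else (if 0 < pvVol x y h then (pvVol x y h, h) else (0, 0))) := by
  have key : ∀ (k : Nat), (k : Int) ≤ m →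
      ((PySem.List.pyRange 1 ((k : Int) + 1) 1).foldl
        (fun (s : Int × Int) i =>
          let volume := (x - 2*i)*(y - 2*i)*i
          if volume > s.1 then (volume, i) else s) (0, 0)) =
      (if (k : Int) ≤ h then (if 0 < pvVol x y k then (pvVol x y (k : Int), (k : Int)) else (0, 0))
       else (if 0 < pvVol x y h then (pvVol x y h, h) else (0, 0))) := by
    intro k
    induction k with
    | zero =>
      intro _
      rw [show ((0 : Nat) : Int) + 1 = 1 by norm_num,
        PySem.List.pyRange_one_eq_nil (by omega)]
      simp only [List.foldl_nil]
      have h0 : ((0 : Nat) : Int) ≤ h := by simp; omega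
      rw [if_pos h0]
      have hv : ¬ (0 < pvVol x y ((0 : Nat) : Int)) := by simp [pvVol]
      rw [if_neg hv]
    | succ k ih =>
      intro hk
      have hk' : (k : Int) ≤ m := by push_cast at hk ⊢; omega
      have hcast : ((k + 1 : Nat) : Int) = (k : Int) + 1 := by push_cast; ring
      rw [hcast, PySem.List.pyRange_one_succ_right (by omega), List.foldl_append,
        ih hk']
      simp only [List.foldl_cons, List.foldl_nil]
      by_cases hkh : (k : Int) + 1 ≤ h
      · -- still climbing: volume strictly increased from k to k+1 (when k ≥ 1)
        rw [if_pos (by omega : (k : Int) ≤ h), if_pos hkh]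
        by_cases hvk : 0 < pvVol x y k
        · have hk1 : 1 ≤ (k : Int) := by
            by_contra hc
            have : (k : Int) = 0 := by omega
            rw [this] at hvk; unfold pvVol at hvk; simp at hvk
          have hdp := H1 k hk1 (by omega)
          unfold pvDelta at hdp
          rw [if_pos hvk]
          have hgt : (x - 2*((k:Int)+1))*(y - 2*((k:Int)+1))*((k:Int)+1) > pvVol x y k := by
            unfold pvVol at *; omega
          rw [if_pos hgt]
          have hpos : 0 < pvVol x y ((k:Int) + 1) := by omega
          rw [if_pos hpos]
          rfl
        · rw [if_neg hvk]
          simp only [gt_iff_lt]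
          unfold pvVol
          rfl
      · -- past the peak: the state never changes again
        rw [if_neg hkh]
        have hstate :
            (if (k : Int) ≤ h then (if 0 < pvVol x y k then (pvVol x y k, (k : Int)) else ((0:Int), (0:Int)))
             else (if 0 < pvVol x y h then (pvVol x y h, h) else (0, 0))) =
            (if 0 < pvVol x y h then (pvVol x y h, h) else ((0:Int), (0:Int))) := by
          by_cases hke : (k : Int) ≤ h
          · have : (k : Int) = h := by omega
            rw [if_pos hke, this]
          · rw [if_neg hke]
        rw [hstate]
        have hle : pvVol x y ((k : Int) + 1) ≤ pvVol x y h := by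
          have := pvVol_le_peak x y m h H2 ((k + 1 : Int) - h).toNat (by omega)
          rwa [show h + (((k:Int) + 1 - h).toNat : Int) = (k : Int) + 1 by omega] at this
        by_cases hvh : 0 < pvVol x y h
        · rw [if_pos hvh]
          have hno : ¬ ((x - 2 * ((k:Int) + 1)) * (y - 2 * ((k:Int) + 1)) * ((k:Int) + 1) > (pvVol x y h, h).1) := by
            show ¬ ((x - 2 * ((k:Int) + 1)) * (y - 2 * ((k:Int) + 1)) * ((k:Int) + 1) > pvVol x y h)
            unfold pvVol at hle ⊢; omega
          rw [if_neg hno]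
        · rw [if_neg hvh]
          have hno : ¬ ((x - 2 * ((k:Int) + 1)) * (y - 2 * ((k:Int) + 1)) * ((k:Int) + 1) > ((0:Int), (0:Int)).1) := by
            show ¬ ((x - 2 * ((k:Int) + 1)) * (y - 2 * ((k:Int) + 1)) * ((k:Int) + 1) > (0:Int))
            unfold pvVol at hle hvh; omega
          rw [if_neg hno]
  intro n hn0 hnm
  have := key n.toNat (by omega)
  rwa [show ((n.toNat : Nat) : Int) = n by omega] at this

-- ===== VERDICT (by name: the statement is the Claim_ definition above) =====
theorem findMaxVolume_spec : Claim_equal_findMaxVolume := by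
  unfold Claim_equal_findMaxVolume Spec_findMaxVolume
  intro x y _
  unfold findMaxVolume findMaxVolume_alt
  by_cases hxy : x < 2 ∨ y < 2
  · rw [if_pos hxy]
    have htx : x < 2 → Int.tdiv x 2 ≤ 0 := by
      intro h
      rcases (by omega : 0 ≤ x ∨ x < 0) with h0 | h0
      · rw [Int.tdiv_eq_ediv_of_nonneg h0]; omega
      · have : Int.tdiv (-(-x)) 2 = -(Int.tdiv (-x) 2) := Int.neg_tdiv (-x) 2
        rw [show x = -(-x) by ring, this]
        rw [Int.tdiv_eq_ediv_of_nonneg (by omega : (0:Int) ≤ -x)]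
        omega
    have hty : y < 2 → Int.tdiv y 2 ≤ 0 := by
      intro h
      rcases (by omega : 0 ≤ y ∨ y < 0) with h0 | h0
      · rw [Int.tdiv_eq_ediv_of_nonneg h0]; omega
      · have : Int.tdiv (-(-y)) 2 = -(Int.tdiv (-y) 2) := Int.neg_tdiv (-y) 2
        rw [show y = -(-y) by ring, this]
        rw [Int.tdiv_eq_ediv_of_nonneg (by omega : (0:Int) ≤ -y)]
        omega
    have hr : min (Int.tdiv x 2 + 1) (Int.tdiv y 2 + 1) ≤ 1 := by
      rcases hxy with h | h
      · have := htx h; omega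
      · have := hty h; omega
    have hnil : PySem.List.pyRange 1 (min (Int.tdiv x 2 + 1) (Int.tdiv y 2 + 1)) 1 = [] :=
      PySem.List.pyRange_one_eq_nil (by omega)
    simp only [hnil, List.foldl_nil]
    norm_num
  · rw [if_neg hxy]
    obtain ⟨hx, hy⟩ : 2 ≤ x ∧ 2 ≤ y := by omega
    have hfx : Int.tdiv x 2 = PySem.Int.floordiv x 2 := by
      rw [Int.tdiv_eq_ediv_of_nonneg (by omega), PySem.Int.floordiv_eq_ediv_of_pos (by norm_num)]
    have hfy : Int.tdiv y 2 = PySem.Int.floordiv y 2 := by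
      rw [Int.tdiv_eq_ediv_of_nonneg (by omega), PySem.Int.floordiv_eq_ediv_of_pos (by norm_num)]
    set m := min (PySem.Int.floordiv x 2) (PySem.Int.floordiv y 2) with hmdef
    have hm1 : 1 ≤ m := by
      have h1 : 1 ≤ PySem.Int.floordiv x 2 :=
        (PySem.Int.le_floordiv_iff_mul_le (by norm_num)).mpr (by omega)
      have h2 : 1 ≤ PySem.Int.floordiv y 2 :=
        (PySem.Int.le_floordiv_iff_mul_le (by norm_num)).mpr (by omega)
      omega
    have hrange : min (Int.tdiv x 2 + 1) (Int.tdiv y 2 + 1) = m + 1 := by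
      rw [hfx, hfy]; omega
    simp only [hrange]
    have spec := pvSearch_spec x y m hx hy hmdef (m - 1).toNat 1 m rfl le_rfl hm1 le_rfl
      (by intro i h1 h2; omega) (by intro i h1 h2; omega)
    set h := pvSearch x y 1 m with hhdef
    have hfold := fold_inv x y m h spec.1 spec.2.1 spec.2.2.1 spec.2.2.2 m (by omega) le_rfl
    simp only [hfold]
    have hT : (if m ≤ h then (if 0 < pvVol x y m then (pvVol x y m, m) else ((0:Int), (0:Int)))
        else (if 0 < pvVol x y h then (pvVol x y h, h) else (0, 0))) =
        (if 0 < pvVol x y h then (pvVol x y h, h) else ((0:Int), (0:Int))) := by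
      by_cases hmh : m ≤ h
      · have : m = h := by omega
        rw [if_pos hmh, this]
      · rw [if_neg hmh]
    simp only [hT]
    by_cases hvh : 0 < pvVol x y h
    · simp only [if_pos hvh]
    · simp only [if_neg hvh]
      norm_num
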